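-- pv_equiv track=rewrite | github.com/dispeter/CS3 | recurse.py | move
-- ===== SOURCE A (Python) =====
-- def move(lst, count):
-- 	if count == 0:
-- 		return lst
-- 	for i in range(len(lst)):
-- 		if lst[i] == 0:
-- 			lst[i] = 1
-- 			return move(lst, count - 1)
-- 	return lst
--
-- lst = [0, 0, 0, 0, 0]
-- ===== SOURCE B (Python) =====
-- def move(lst, count):
--     # single linear pass; equivalence to A is about the RETURN value only
--     # (A mutates lst in place, B builds a fresh list)
--     res = []
--     for x in lst:
--         if count != 0 and x == 0:
--             res.append(1)
--             count -= 1
--         else: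
--             res.append(x)
--     return res
-- ===== Notes on version B (the rewrite author's own statement) =====
-- stated objective: alternative
-- what changed: A flips one zero per recursive call, rescanning the list from the front each time; B flips the first min(count, zeros) zeros in one linear pass with a decrementing counter, building a fresh list instead of mutating.
import Mathlib
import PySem

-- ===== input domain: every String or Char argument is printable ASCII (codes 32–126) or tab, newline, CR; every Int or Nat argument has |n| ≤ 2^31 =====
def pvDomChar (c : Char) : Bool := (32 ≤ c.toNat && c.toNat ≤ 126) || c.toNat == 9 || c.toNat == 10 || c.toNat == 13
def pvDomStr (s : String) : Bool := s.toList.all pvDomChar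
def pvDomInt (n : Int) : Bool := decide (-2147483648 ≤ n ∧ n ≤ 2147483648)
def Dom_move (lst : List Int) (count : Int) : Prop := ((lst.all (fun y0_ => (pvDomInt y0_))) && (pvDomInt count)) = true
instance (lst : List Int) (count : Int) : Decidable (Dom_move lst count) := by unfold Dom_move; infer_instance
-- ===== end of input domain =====

-- B replaces A's restart-from-front recursion by a single linear pass with a decrementing
-- counter; equivalence is about the RETURN value only (A mutates lst in place).


-- ===== PORT A =====
-- A's for-loop: find the index of the first 0 (none = loop falls through)
def findZeroIdx : List Int → Option Nat
  | [] => none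
  | x :: xs => if x = 0 then some 0 else (findZeroIdx xs).map (· + 1)

-- termination helper for the port (cited by decreasing_by)
theorem count_set_lt (lst : List Int) (i : Nat) (h : findZeroIdx lst = some i) :
    (lst.set i 1).count 0 < lst.count 0 := by
  induction lst generalizing i with
  | nil => simp [findZeroIdx] at h
  | cons x xs ih =>
    by_cases hx : x = 0
    · simp [findZeroIdx, hx] at h
      subst h hx
      simp
    · simp [findZeroIdx, hx] at h
      obtain ⟨j, hj, rfl⟩ := h
      simpa [List.count_cons, hx] using ih j hj

def move (lst : List Int) (count : Int) : List Int :=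
  if count = 0 then lst
  else
    match h : findZeroIdx lst with
    | some i => move (lst.set i 1) (count - 1)
    | none => lst
termination_by lst.count 0
decreasing_by exact count_set_lt lst i h

-- ===== PORT B =====
def move_alt (lst : List Int) (count : Int) : List Int :=
  match lst with
  | [] => []
  | x :: xs => if count ≠ 0 ∧ x = 0 then 1 :: move_alt xs (count - 1) else x :: move_alt xs count

-- ===== PRECONDITION & SPEC =====
def Spec_move (lst : List Int) (count : Int) (out : List Int) : Prop := out = move_alt lst count
instance (lst : List Int) (count : Int) (out : List Int) : Decidable (Spec_move lst count out) := by unfold Spec_move; infer_instance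

-- ===== CLAIM (what is proved, stated in full; the proofs are below) =====
def Claim_equal_move : Prop := ∀ (lst : List Int) (count : Int), Dom_move lst count → Spec_move lst count (move lst count)

-- ===== LEMMAS AND PROOFS =====
theorem move_alt_zero (lst : List Int) : move_alt lst 0 = lst := by
  induction lst with
  | nil => rfl
  | cons x xs ih => simp [move_alt, ih]

theorem move_alt_nozero (lst : List Int) (count : Int) (h : findZeroIdx lst = none) :
    move_alt lst count = lst := by
  induction lst generalizing count with
  | nil => rfl
  | cons x xs ih =>
    by_cases hx : x = 0
    · simp [findZeroIdx, hx] at h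
    · simp [findZeroIdx, hx] at h
      simp [move_alt, hx, ih _ h]

theorem move_alt_step (lst : List Int) (count : Int) (i : Nat)
    (hc : count ≠ 0) (h : findZeroIdx lst = some i) :
    move_alt lst count = move_alt (lst.set i 1) (count - 1) := by
  induction lst generalizing i count with
  | nil => simp [findZeroIdx] at h
  | cons x xs ih =>
    by_cases hx : x = 0
    · simp [findZeroIdx, hx] at h
      subst h hx
      simp [move_alt, hc]
    · simp [findZeroIdx, hx] at h
      obtain ⟨j, hj, rfl⟩ := h
      simp [move_alt, hx, List.set]
      exact ih count j hc hj

-- ===== VERDICT (by name: the statement is the Claim_ definition above) =====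
theorem move_eq_alt (lst : List Int) (count : Int) : move lst count = move_alt lst count := by
  fun_induction move lst count with
  | case1 lst => exact (move_alt_zero lst).symm
  | case2 lst count hc i h ih =>
      rw [ih, ← move_alt_step lst count i hc h]
  | case3 lst count hc h => exact (move_alt_nozero lst count h).symm

theorem move_spec : Claim_equal_move := by
  intro lst count _
  exact move_eq_alt lst count
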